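-- pv_equiv track=rewrite | github.com/nogatseb/dcs2hc | dcs2hc/parsers.py | _all_balanced_brace_pairs
-- ===== SOURCE A (Python) =====
-- def _all_balanced_brace_pairs(text: str) -> list[tuple[int, int]]:
--     """Return every (start, end) brace pair, where end is exclusive (the index
--     just past the closing '}'). Includes nested pairs."""
--     starts: list[int] = []
--     pairs: list[tuple[int, int]] = []
--     in_str: str | None = None
--     i = 0
--     while i < len(text):
--         c = text[i]
--         if in_str:
--             if c == "\\" and i + 1 < len(text):
--                 i += 2
--                 continue
--             if c == in_str:
--                 in_str = None
--         else:
--             if c in ('"', "'"):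
--                 in_str = c
--             elif c == "{":
--                 starts.append(i)
--             elif c == "}" and starts:
--                 start = starts.pop()
--                 pairs.append((start, i + 1))
--         i += 1
--     return pairs
-- ===== SOURCE B (Python) =====
-- def _all_balanced_brace_pairs(text: str) -> list[tuple[int, int]]:
--     """Return every (start, end) brace pair, end exclusive. Includes nested pairs."""
--     # Pass 1: lex out-of-string brace events (index, kind), tracking quote state.
--     events: list[tuple[int, str]] = []
--     in_str: str | None = None
--     i = 0
--     n = len(text)
--     while i < n:
--         c = text[i]
--         if in_str:
--             if c == "\\" and i + 1 < n:
--                 i += 2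
--                 continue
--             if c == in_str:
--                 in_str = None
--         elif c in '"\'':
--             in_str = c
--         elif c in "{}":
--             events.append((i, c))
--         i += 1
--     # Pass 2: match the events with a stack.
--     stack: list[int] = []
--     pairs: list[tuple[int, int]] = []
--     for idx, c in events:
--         if c == "{":
--             stack.append(idx)
--         elif stack:
--             pairs.append((stack.pop(), idx + 1))
--     return pairs
-- ===== Notes on version B (the rewrite author's own statement) =====
-- stated objective: alternative
-- what changed: Splits A's single matching loop into two differently-shaped passes: a lexer that emits only out-of-string brace events, then a stack fold over that short event list; the second pass touches only braces instead of every character, a constant-factor saving.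
import Mathlib
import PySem

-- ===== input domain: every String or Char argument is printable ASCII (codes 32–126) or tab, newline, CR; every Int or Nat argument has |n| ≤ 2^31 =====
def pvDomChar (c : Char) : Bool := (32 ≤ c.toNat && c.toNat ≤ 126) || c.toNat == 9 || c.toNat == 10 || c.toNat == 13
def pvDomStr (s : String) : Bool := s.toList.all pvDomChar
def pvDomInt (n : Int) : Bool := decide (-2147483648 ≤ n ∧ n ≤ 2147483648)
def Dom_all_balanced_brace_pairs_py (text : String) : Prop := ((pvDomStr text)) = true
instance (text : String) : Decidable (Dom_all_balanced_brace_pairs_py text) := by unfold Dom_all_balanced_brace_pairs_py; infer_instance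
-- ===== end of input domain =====

-- B replaces A's single-loop matcher by two passes — a lexer emitting out-of-string
-- brace events, then a stack fold over that event list — same return value (alternative).

-- ===== PORT A =====
-- A's while-loop: state (starts, pairs, in_str), index i, advancing 1 or 2 chars.
def aLoop : List Char → Int → Option Char → List Int → List (Int × Int) → List (Int × Int)
  | [], _, _, _, pairs => pairs
  | c :: rest, i, some q, starts, pairs =>
      if c = '\\' ∧ rest ≠ [] then
        aLoop rest.tail (i + 2) (some q) starts pairs
      else if c = q then
        aLoop rest (i + 1) none starts pairs
      else
        aLoop rest (i + 1) (some q) starts pairs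
  | c :: rest, i, none, starts, pairs =>
      if c = '"' ∨ c = '\'' then
        aLoop rest (i + 1) (some c) starts pairs
      else if c = '{' then
        aLoop rest (i + 1) none (i :: starts) pairs
      else if c = '}' then
        match starts with
        | [] => aLoop rest (i + 1) none [] pairs
        | s :: ss => aLoop rest (i + 1) none ss (pairs ++ [(s, i + 1)])
      else
        aLoop rest (i + 1) none starts pairs
  termination_by cs _ _ _ _ => cs.length
  decreasing_by all_goals simp_all [List.length_tail]

def all_balanced_brace_pairs_py (text : String) : List (Int × Int) :=
  aLoop text.toList 0 none [] []

-- ===== PORT B =====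
-- Pass 1: lex brace events (index, kind) outside strings.
def bLex : List Char → Int → Option Char → List (Int × Char)
  | [], _, _ => []
  | c :: rest, i, some q =>
      if c = '\\' ∧ rest ≠ [] then
        bLex rest.tail (i + 2) (some q)
      else if c = q then
        bLex rest (i + 1) none
      else
        bLex rest (i + 1) (some q)
  | c :: rest, i, none =>
      if c = '"' ∨ c = '\'' then
        bLex rest (i + 1) (some c)
      else if c = '{' ∨ c = '}' then
        (i, c) :: bLex rest (i + 1) none
      else
        bLex rest (i + 1) none
  termination_by cs _ _ => cs.length
  decreasing_by all_goals simp_all [List.length_tail]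

-- Pass 2: match the events with a stack.
def bMatch : List (Int × Char) → List Int → List (Int × Int) → List (Int × Int)
  | [], _, pairs => pairs
  | (i, c) :: es, stack, pairs =>
      if c = '{' then bMatch es (i :: stack) pairs
      else
        match stack with
        | [] => bMatch es [] pairs
        | s :: ss => bMatch es ss (pairs ++ [(s, i + 1)])

def all_balanced_brace_pairs_py_alt (text : String) : List (Int × Int) :=
  bMatch (bLex text.toList 0 none) [] []

-- ===== PRECONDITION & SPEC =====
def Spec_all_balanced_brace_pairs_py (text : String) (out : List (Int × Int)) : Prop := out = all_balanced_brace_pairs_py_alt text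
instance (text : String) (out : List (Int × Int)) : Decidable (Spec_all_balanced_brace_pairs_py text out) := by unfold Spec_all_balanced_brace_pairs_py; infer_instance

-- ===== CLAIM (what is proved, stated in full; the proofs are below) =====
def Claim_equal_all_balanced_brace_pairs_py : Prop := ∀ (text : String), Dom_all_balanced_brace_pairs_py text → Spec_all_balanced_brace_pairs_py text (all_balanced_brace_pairs_py text)

-- ===== LEMMAS AND PROOFS =====
theorem aLoop_eq_bMatch_bLex :
    ∀ (cs : List Char) (i : Int) (q : Option Char) (starts : List Int) (pairs : List (Int × Int)),
      aLoop cs i q starts pairs = bMatch (bLex cs i q) starts pairs := by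
  intro cs i q starts pairs
  fun_induction aLoop cs i q starts pairs <;>
    simp_all only [bLex, bMatch, if_pos, List.tail] <;>
    split <;> simp_all [bMatch]

-- ===== VERDICT (by name: the statement is the Claim_ definition above) =====
theorem all_balanced_brace_pairs_py_spec : Claim_equal_all_balanced_brace_pairs_py := by
  intro text _
  unfold Spec_all_balanced_brace_pairs_py all_balanced_brace_pairs_py all_balanced_brace_pairs_py_alt
  exact aLoop_eq_bMatch_bLex _ _ _ _ _
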